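-- pv_equiv track=rewrite | github.com/wirehest/games-and-theory | challenges/codewars/k6/split_strings.py | solution
-- ===== SOURCE A (Python) =====
-- def solution(s):
--     """Takes input string and returns list of two-character pairs.
--     Odd-length strings have an underscore appended.
--     """
--     split = []
--     s += '_' if len(s) % 2 != 0 else ''
--     i = 0
--
--     while i < len(s) - 1:
--         split.append(s[i] + s[i+1])
--         i += 2
--
--     return split
-- ===== SOURCE B (Python) =====
-- def solution(s):
--     t = s + ('_' if len(s) % 2 else '')
--     return [a + b for a, b in zip(t[::2], t[1::2])]
-- ===== Notes on version B (the rewrite author's own statement) =====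
-- stated objective: idiomatic
-- what changed: Replaces the index-counter while-loop with padding followed by zipping the even-strided and odd-strided slices and concatenating each pair (strided slicing and zip run in C, removing per-character Python-level indexing).
import Mathlib
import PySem

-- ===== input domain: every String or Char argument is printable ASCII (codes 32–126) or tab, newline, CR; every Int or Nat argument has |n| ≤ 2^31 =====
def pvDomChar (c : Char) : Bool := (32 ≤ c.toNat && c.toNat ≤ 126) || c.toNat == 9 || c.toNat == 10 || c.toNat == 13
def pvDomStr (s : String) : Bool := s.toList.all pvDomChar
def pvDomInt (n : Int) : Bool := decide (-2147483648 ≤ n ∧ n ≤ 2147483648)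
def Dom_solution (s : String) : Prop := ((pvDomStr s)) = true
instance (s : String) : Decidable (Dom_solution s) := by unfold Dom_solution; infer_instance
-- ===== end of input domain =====

-- B pads the string then zips the even- and odd-strided halves; A walks an index counter two at a time.

-- ===== PORT A =====
-- while i < len(t) - 1: split.append(t[i] + t[i+1]); i += 2   — the loop consumes two
-- leading characters per iteration, transcribed as structural recursion on the list.
def solutionLoop : List Char → List String
  | a :: b :: rest => String.ofList [a, b] :: solutionLoop rest
  | _ => []

def solution (s : String) : List String :=
  let t := s.toList ++ (if s.toList.length % 2 ≠ 0 then ['_'] else [])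
  solutionLoop t

-- ===== PORT B =====
-- t[::2] / t[1::2]: every other character starting at index 0 / 1.
def everyOther : List Char → List Char
  | [] => []
  | [a] => [a]
  | a :: _ :: rest => a :: everyOther rest

def solution_alt (s : String) : List String :=
  let t := s.toList ++ (if s.toList.length % 2 ≠ 0 then ['_'] else [])
  List.zipWith (fun a b => String.ofList [a, b]) (everyOther t) (everyOther (t.drop 1))

-- ===== PRECONDITION & SPEC =====
def Spec_solution (s : String) (out : List String) : Prop := out = solution_alt s
instance (s : String) (out : List String) : Decidable (Spec_solution s out) := by unfold Spec_solution; infer_instance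

-- ===== CLAIM (what is proved, stated in full; the proofs are below) =====
def Claim_equal_solution : Prop := ∀ (s : String), Dom_solution s → Spec_solution s (solution s)

-- ===== LEMMAS AND PROOFS =====
theorem loop_eq_zip : ∀ (l : List Char),
    solutionLoop l = List.zipWith (fun a b => String.ofList [a, b]) (everyOther l) (everyOther (l.drop 1))
  | [] => by simp [solutionLoop, everyOther]
  | [a] => by simp [solutionLoop, everyOther]
  | a :: b :: rest => by
    have h := loop_eq_zip rest
    cases rest with
    | nil => simp [solutionLoop, everyOther]
    | cons c rest' =>
      simp only [solutionLoop, everyOther, List.drop_one, List.tail_cons, List.zipWith_cons_cons]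
      rw [h]; simp

-- ===== VERDICT (by name: the statement is the Claim_ definition above) =====
theorem solution_spec : Claim_equal_solution := by
  intro s _
  show solution s = solution_alt s
  simp only [solution, solution_alt]
  exact loop_eq_zip _
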